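-- pv_equiv track=rewrite | github.com/openedx/ecommerce | ecommerce/extensions/catalogue/utils.py | _get_path_for_next
-- ===== SOURCE A (Python) =====
-- def _get_next_character(character):
--     """
--     Provides next alphabetic character
--     """
--     ascii_code = ord(character)
--     # If character is 'Z', then return 'A' and indicate that next character should also be updated
--     if ascii_code + 1 > 90:
--         return chr(65), True
--     # If the character is '0', replace it with 'A'
--     if ascii_code == 48:
--         return chr(65), False
--     return chr(ascii_code + 1), False
--
-- def _get_path_for_next(old_path):
--     """
--     Provides path for the next child
--     """
--     path = list(old_path)
--     for i in reversed(range(len(path))):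
--         updated_character, to_update_next = _get_next_character(old_path[i])
--         path[i] = updated_character
--         # Check whether next character should be updated or not
--         if not to_update_next:
--             break
--     return "".join(path)
-- ===== SOURCE B (Python) =====
-- def _get_next_character(character):
--     """
--     Provides next alphabetic character
--     """
--     ascii_code = ord(character)
--     # If character is 'Z', then return 'A' and indicate that next character should also be updated
--     if ascii_code + 1 > 90:
--         return chr(65), True
--     # If the character is '0', replace it with 'A'
--     if ascii_code == 48:
--         return chr(65), False
--     return chr(ascii_code + 1), False
--
--
-- def _increment(segment):
--     """
--     Increments `segment` (carry coming in from its right end); returns the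
--     incremented string and whether a carry propagates out to the left.
--     Divide and conquer: increment the right half; only when it carries out,
--     increment the left half as well.
--     """
--     if len(segment) == 0:
--         return "", True
--     if len(segment) == 1:
--         return _get_next_character(segment[0])
--     mid = len(segment) // 2
--     left, right = segment[:mid], segment[mid:]
--     right_inc, right_carry = _increment(right)
--     if not right_carry:
--         return left + right_inc, False
--     left_inc, left_carry = _increment(left)
--     return left_inc + right_inc, left_carry
--
--
-- def _get_path_for_next(old_path):
--     """
--     Provides path for the next child
--     """
--     return _increment(old_path)[0]
-- ===== Notes on version B (the rewrite author's own statement) =====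
-- stated objective: alternative
-- what changed: Replaces the right-to-left per-character carry loop with break by a divide-and-conquer increment: split the string in halves, increment the right half, and only if it carries out increment the left half too, concatenating the results (recursion depth O(log n)).
import Mathlib
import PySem

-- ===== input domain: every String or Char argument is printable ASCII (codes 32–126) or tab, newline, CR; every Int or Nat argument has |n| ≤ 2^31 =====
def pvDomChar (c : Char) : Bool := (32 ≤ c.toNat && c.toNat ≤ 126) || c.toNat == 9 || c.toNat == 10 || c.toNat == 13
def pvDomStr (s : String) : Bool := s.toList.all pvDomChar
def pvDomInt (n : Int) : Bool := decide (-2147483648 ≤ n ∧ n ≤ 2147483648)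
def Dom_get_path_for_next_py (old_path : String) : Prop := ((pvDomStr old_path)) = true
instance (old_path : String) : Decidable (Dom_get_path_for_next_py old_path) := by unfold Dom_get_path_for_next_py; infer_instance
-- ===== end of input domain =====

-- B replaces A's right-to-left carry loop by a divide-and-conquer increment on halves (objective: alternative).

-- ===== PORT A =====
-- _get_next_character: carry to chr(65) for ord + 1 > 90, ord 48 → chr(65), else next char
def pvNextChar (c : Char) : Char × Bool :=
  if c.toNat + 1 > 90 then (Char.ofNat 65, true)
  else if c.toNat = 48 then (Char.ofNat 65, false)
  else (Char.ofNat (c.toNat + 1), false)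

-- A's loop over reversed(range(len)) with break, on the reversed character list:
-- on carry keep going; otherwise replace this char and keep the rest unchanged.
def pvLoopA : List Char → List Char
  | [] => []
  | c :: rest =>
      let p := pvNextChar c
      if p.2 then p.1 :: pvLoopA rest else p.1 :: rest

def get_path_for_next_py (old_path : String) : String :=
  String.mk ((pvLoopA old_path.toList.reverse).reverse)

-- ===== PORT B =====
-- _increment: divide and conquer; increment the right half, and only when it
-- carries out increment the left half too; returns (incremented chars, carry out).
def pvInc : List Char → List Char × Bool
  | [] => ([], true)
  | [c] => let p := pvNextChar c; ([p.1], p.2)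
  | x :: y :: t =>
      let mid := (x :: y :: t : List Char).length / 2
      let left := (x :: y :: t).take mid
      let right := (x :: y :: t).drop mid
      let ri := pvInc right
      if ri.2 = false then (left ++ ri.1, false)
      else
        let li := pvInc left
        (li.1 ++ ri.1, li.2)
termination_by l => l.length
decreasing_by
  · simp; omega
  · simp; omega

def get_path_for_next_py_alt (old_path : String) : String :=
  String.mk (pvInc old_path.toList).1

-- ===== PRECONDITION & SPEC =====
def Spec_get_path_for_next_py (old_path : String) (out : String) : Prop := out = get_path_for_next_py_alt old_path
instance (old_path : String) (out : String) : Decidable (Spec_get_path_for_next_py old_path out) := by unfold Spec_get_path_for_next_py; infer_instance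

-- ===== CLAIM (what is proved, stated in full; the proofs are below) =====
def Claim_equal_get_path_for_next_py : Prop := ∀ (old_path : String), Dom_get_path_for_next_py old_path → Spec_get_path_for_next_py old_path (get_path_for_next_py old_path)

-- ===== LEMMAS AND PROOFS =====

-- running A's loop past an all-carrying prefix turns it into 'A's and continues
theorem pvLoopA_append_carry (r s : List Char) (h : ∀ x ∈ r, 90 ≤ x.toNat) :
    pvLoopA (r ++ s) = List.replicate r.length 'A' ++ pvLoopA s := by
  induction r with
  | nil => simp
  | cons c t ih =>
      have hc : pvNextChar c = (Char.ofNat 65, true) := by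
        unfold pvNextChar; rw [if_pos (by have := h c (by simp); omega)]
      simp only [List.cons_append, pvLoopA, hc, List.length_cons, List.replicate_succ]
      simpa using ih (fun x hx => h x (by simp [hx]))

-- A's loop stops inside a prefix holding a non-carrying character
theorem pvLoopA_append_stop (r s : List Char) (h : ∃ x ∈ r, ¬ 90 ≤ x.toNat) :
    pvLoopA (r ++ s) = pvLoopA r ++ s := by
  induction r with
  | nil => simp at h
  | cons c t ih =>
      by_cases hc : 90 ≤ c.toNat
      · have hcc : pvNextChar c = (Char.ofNat 65, true) := by
          unfold pvNextChar; rw [if_pos (by omega)]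
        have ht : ∃ x ∈ t, ¬ 90 ≤ x.toNat := by
          rcases h with ⟨x, hx, hxn⟩
          rcases List.mem_cons.mp hx with h1 | h2
          · exact absurd (h1 ▸ hc) hxn
          · exact ⟨x, h2, hxn⟩
        simp only [List.cons_append, pvLoopA, hcc, ih ht]
        simp
      · have hcc : (pvNextChar c).2 = false := by
          unfold pvNextChar
          rw [if_neg (by omega)]
          by_cases h48 : c.toNat = 48 <;> simp [h48]
        simp only [List.cons_append, pvLoopA]
        rw [if_neg (by simp [hcc]), if_neg (by simp [hcc])]
        simp

-- on an all-carrying list A's loop produces only 'A's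
theorem pvLoopA_all (r : List Char) (h : ∀ x ∈ r, 90 ≤ x.toNat) :
    pvLoopA r = List.replicate r.length 'A' := by
  have h1 := pvLoopA_append_carry r [] h
  simp only [List.append_nil] at h1
  rw [h1]
  simp [pvLoopA]

-- B's divide-and-conquer increment computes exactly A's loop result (read on the
-- unreversed list), and its carry-out flag says every character carries.
theorem pvInc_eq (l : List Char) :
    pvInc l = ((pvLoopA l.reverse).reverse, l.all (fun c => decide (90 ≤ c.toNat))) := by
  induction hn : l.length using Nat.strong_induction_on generalizing l with
  | _ n ih =>
  match l, hn with
  | [], _ => simp [pvInc, pvLoopA]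
  | [c], _ =>
      have h1 : pvLoopA [c] = [(pvNextChar c).1] := by
        unfold pvLoopA
        by_cases h : (pvNextChar c).2 <;> simp [h, pvLoopA]
      have h2 : (pvNextChar c).2 = decide (90 ≤ c.toNat) := by
        unfold pvNextChar
        by_cases h : 90 ≤ c.toNat
        · rw [if_pos (by omega)]; simp [h]
        · rw [if_neg (by omega)]
          by_cases h48 : c.toNat = 48 <;> simp [h48, h]
      simp [pvInc, h1, h2]
  | x :: y :: t, hn =>
      rw [pvInc]
      simp only
      have hlen : 2 ≤ (x :: y :: t : List Char).length := by simp
      generalize hg : (x :: y :: t : List Char) = l at hn hlen ⊢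
      have hmid1 : 1 ≤ l.length / 2 := by omega
      have hmidlt : l.length / 2 < l.length := by omega
      have ihR := ih (l.drop (l.length / 2)).length
        (by simp; omega) (l.drop (l.length / 2)) rfl
      have ihL := ih (l.take (l.length / 2)).length
        (by simp; omega) (l.take (l.length / 2)) rfl
      have hsplit : l = l.take (l.length / 2) ++ l.drop (l.length / 2) :=
        (List.take_append_drop _ l).symm
      have hrev : l.reverse
          = (l.drop (l.length / 2)).reverse ++ (l.take (l.length / 2)).reverse := by
        conv_lhs => rw [hsplit]
        simp
      by_cases hcr : (l.drop (l.length / 2)).all (fun c => decide (90 ≤ c.toNat)) = true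
      · -- right half carries out: both halves incremented
        have hallR : ∀ z ∈ l.drop (l.length / 2), 90 ≤ z.toNat := by
          intro z hz; simpa using List.all_eq_true.mp hcr z hz
        rw [ihR, ihL, hcr]
        rw [if_neg (by simp)]
        rw [hrev, pvLoopA_append_carry _ _ (by intro z hz; exact hallR z (by simpa using hz)),
          pvLoopA_all (l.drop (l.length / 2)).reverse
            (by intro z hz; exact hallR z (by simpa using hz))]
        simp only [Prod.mk.injEq]
        constructor
        · simp [List.reverse_append, List.reverse_replicate]
        · conv_rhs => rw [hsplit]
          rw [List.all_append, hcr, Bool.and_true]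
      · -- right half absorbs the increment: left half unchanged
        have hcr' : (l.drop (l.length / 2)).all (fun c => decide (90 ≤ c.toNat)) = false := by
          simpa using hcr
        have hex : ∃ z ∈ (l.drop (l.length / 2)).reverse, ¬ 90 ≤ z.toNat := by
          rcases List.all_eq_false.mp hcr' with ⟨z, hz, hzn⟩
          exact ⟨z, by simpa using hz, by simpa using hzn⟩
        rw [ihR, hcr']
        rw [if_pos rfl]
        rw [hrev, pvLoopA_append_stop _ _ hex]
        simp only [Prod.mk.injEq]
        constructor
        · simp [List.reverse_append]
        · conv_rhs => rw [hsplit]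
          rw [List.all_append, hcr', Bool.and_false]

-- ===== VERDICT (by name: the statement is the Claim_ definition above) =====
theorem get_path_for_next_py_spec : Claim_equal_get_path_for_next_py := by
  intro s _
  unfold Spec_get_path_for_next_py get_path_for_next_py get_path_for_next_py_alt
  rw [pvInc_eq]
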